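-- pv_equiv track=rewrite | github.com/nowstartboy/my_code_new | the_exam/weiruan1.py | numberOfDays
-- ===== SOURCE A (Python) =====
-- def numberOfDays(numOfPlants,plantHeight):
--     if numOfPlants==1:
--         return 1
--     cutPlants=[]
--     for i in range(numOfPlants-1):
--         if plantHeight[i]>plantHeight[i+1]:
--             cutPlants.append(plantHeight[i+1])
--     if len(cutPlants)==0:
--         return 1
--     cutedPlants=[i for i in plantHeight if i not in cutPlants]
--     print (cutedPlants)
--     return 1+numberOfDays(len(cutedPlants),cutedPlants)
-- ===== SOURCE B (Python) =====
-- def numberOfDays(numOfPlants, plantHeight):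
--     days = 1
--     while numOfPlants > 1:
--         cutPlants = [b for a, b in zip(plantHeight, plantHeight[1:numOfPlants]) if a > b]
--         if not cutPlants:
--             return days
--         cutedPlants = [x for x in plantHeight if x not in cutPlants]
--         print(cutedPlants)
--         days += 1
--         numOfPlants = len(cutedPlants)
--         plantHeight = cutedPlants
--     return days
-- ===== Notes on version B (the rewrite author's own statement) =====
-- stated objective: simpler
-- what changed: Replaced the tail recursion with an iterative while-loop carrying a days accumulator, and replaced the index-based range(n-1) scan with a zip over adjacent pairs (plantHeight zipped with plantHeight[1:numOfPlants]).
import Mathlib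
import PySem

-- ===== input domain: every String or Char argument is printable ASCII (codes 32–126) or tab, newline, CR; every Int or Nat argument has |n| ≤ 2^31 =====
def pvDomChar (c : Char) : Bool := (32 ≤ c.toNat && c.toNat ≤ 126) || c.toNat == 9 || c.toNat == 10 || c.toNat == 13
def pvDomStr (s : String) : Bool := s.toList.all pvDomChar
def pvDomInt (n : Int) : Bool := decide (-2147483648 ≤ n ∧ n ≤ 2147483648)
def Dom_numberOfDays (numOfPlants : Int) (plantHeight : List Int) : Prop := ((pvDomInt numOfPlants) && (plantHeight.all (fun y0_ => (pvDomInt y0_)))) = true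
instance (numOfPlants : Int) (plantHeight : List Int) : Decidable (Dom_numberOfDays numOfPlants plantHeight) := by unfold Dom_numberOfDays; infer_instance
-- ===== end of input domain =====

-- B rewrites A's tail recursion as a while-loop with a days accumulator and scans adjacent pairs
-- via zip instead of index arithmetic; equivalence is about the RETURN value only (both Pythons
-- also print the same lines, which the Lean ports drop).

-- ===== PORT A =====
-- A's recursion strictly shrinks the list on Pre_ inputs; the fuel (plantHeight.length + 1)
-- only makes the recursion total in Lean and is never exhausted under Pre_.
def numberOfDaysFuel : Nat → Int → List Int → Int
  | 0, _, _ => 1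
  | fuel+1, numOfPlants, plantHeight =>
    if numOfPlants = 1 then 1
    else
      let cutPlants := (PySem.List.pyRange 0 (numOfPlants - 1) 1).foldl
        (fun acc i =>
          if PySem.List.pyGetD plantHeight i 0 > PySem.List.pyGetD plantHeight (i+1) 0
          then acc ++ [PySem.List.pyGetD plantHeight (i+1) 0] else acc) []
      if cutPlants = [] then 1
      else
        let cutedPlants := plantHeight.filter (fun i => !(cutPlants.contains i))
        1 + numberOfDaysFuel fuel (cutedPlants.length : Int) cutedPlants

def numberOfDays (numOfPlants : Int) (plantHeight : List Int) : Int :=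
  numberOfDaysFuel (plantHeight.length + 1) numOfPlants plantHeight

-- ===== PORT B =====
def numberOfDaysLoop : Nat → Int → Int → List Int → Int
  | 0, days, _, _ => days
  | fuel+1, days, numOfPlants, plantHeight =>
    if 1 < numOfPlants then
      let cutPlants :=
        ((plantHeight.zip (PySem.List.slice plantHeight (some 1) (some numOfPlants))).filter
          (fun p => p.1 > p.2)).map Prod.snd
      if cutPlants = [] then days
      else
        let cutedPlants := plantHeight.filter (fun x => !(cutPlants.contains x))
        numberOfDaysLoop fuel (days + 1) (cutedPlants.length : Int) cutedPlants
    else days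

def numberOfDays_alt (numOfPlants : Int) (plantHeight : List Int) : Int :=
  numberOfDaysLoop (plantHeight.length + 1) 1 numOfPlants plantHeight

-- ===== PRECONDITION & SPEC =====
-- Pre_ excludes exactly the inputs where A raises IndexError: numOfPlants > 1 together with
-- numOfPlants > len(plantHeight) makes A read past the end of the list.
def Pre_numberOfDays (numOfPlants : Int) (plantHeight : List Int) : Prop :=
  numOfPlants ≤ 1 ∨ numOfPlants ≤ (plantHeight.length : Int)
instance (numOfPlants : Int) (plantHeight : List Int) : Decidable (Pre_numberOfDays numOfPlants plantHeight) := by unfold Pre_numberOfDays; infer_instance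

def pvWitness_numberOfDays : Int × List Int := (3, [3, 1, 2])

def Spec_numberOfDays (numOfPlants : Int) (plantHeight : List Int) (out : Int) : Prop := out = numberOfDays_alt numOfPlants plantHeight
instance (numOfPlants : Int) (plantHeight : List Int) (out : Int) : Decidable (Spec_numberOfDays numOfPlants plantHeight out) := by unfold Spec_numberOfDays; infer_instance

-- ===== CLAIM (what is proved, stated in full; the proofs are below) =====
def Claim_equal_numberOfDays : Prop := ∀ (numOfPlants : Int) (plantHeight : List Int), Dom_numberOfDays numOfPlants plantHeight → Pre_numberOfDays numOfPlants plantHeight → Spec_numberOfDays numOfPlants plantHeight (numberOfDays numOfPlants plantHeight)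

-- ===== LEMMAS AND PROOFS =====
lemma foldl_append_ite {α β : Type} (p : α → Prop) [DecidablePred p] (f : α → β) (l : List α) (init : List β) :
    l.foldl (fun acc x => if p x then acc ++ [f x] else acc) init
      = init ++ (l.filter (fun x => decide (p x))).map f := by
  induction l generalizing init with
  | nil => simp
  | cons a t ih =>
    simp only [List.foldl_cons, List.filter_cons]
    by_cases hp : p a
    · simp [hp, ih]
    · simp [hp, ih]

lemma zip_drop_take (m : Nat) : ∀ (h : List Int), m + 1 ≤ h.length →
    h.zip ((h.drop 1).take m) = (List.range m).map (fun i => (h.getD i 0, h.getD (i+1) 0)) := by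
  induction m with
  | zero => intro h _; simp
  | succ j ih =>
    intro h hm
    match h, hm with
    | a :: b :: t, hm =>
      have ihb := ih (b :: t) (by simp at hm ⊢; omega)
      simp only [List.drop_succ_cons, List.drop_zero] at ihb ⊢
      simp only [List.take_succ_cons, List.zip_cons_cons, List.range_succ_eq_map,
        List.map_cons, List.map_map]
      rw [ihb]
      simp [Function.comp]

lemma cut_eq (n : Int) (h : List Int) (h1 : 1 < n) (h2 : n ≤ (h.length : Int)) :
    (PySem.List.pyRange 0 (n - 1) 1).foldl
        (fun acc i =>
          if PySem.List.pyGetD h i 0 > PySem.List.pyGetD h (i+1) 0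
          then acc ++ [PySem.List.pyGetD h (i+1) 0] else acc) []
      = ((h.zip (PySem.List.slice h (some 1) (some n))).filter
          (fun p => p.1 > p.2)).map Prod.snd := by
  have hslice : PySem.List.slice h (some 1) (some n) = (h.drop 1).take (n.toNat - 1) := by
    rw [PySem.List.slice_toNat h (by omega) (by omega)]
    norm_num
  rw [hslice, zip_drop_take (n.toNat - 1) h (by omega)]
  rw [foldl_append_ite (fun i => PySem.List.pyGetD h i 0 > PySem.List.pyGetD h (i+1) 0)
        (fun i => PySem.List.pyGetD h (i+1) 0)]
  rw [PySem.List.pyRange_one]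
  have hcast : (n - 1 - 0).toNat = n.toNat - 1 := by omega
  rw [hcast]
  simp only [List.filter_map, List.map_map, List.nil_append]
  have e1 : ∀ k : Nat, PySem.List.pyGetD h ((0:Int) + (k:Int)) 0 = h.getD k 0 := by
    intro k; simp
  have e2 : ∀ k : Nat, PySem.List.pyGetD h ((0:Int) + (k:Int) + 1) 0 = h.getD (k+1) 0 := by
    intro k
    have e : (0:Int) + (k:Int) + 1 = ((k+1 : Nat) : Int) := by push_cast; ring
    rw [e]; simpa using PySem.List.pyGetD_natCast h (k+1) 0
  have hpq : List.filter
        ((fun x => decide (PySem.List.pyGetD h x 0 > PySem.List.pyGetD h (x + 1) 0)) ∘ fun k : Nat => (0:Int) + ↑k)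
        (List.range (n.toNat - 1))
      = List.filter ((fun p : Int × Int => decide (p.1 > p.2)) ∘ fun i : Nat => (h.getD i 0, h.getD (i + 1) 0))
        (List.range (n.toNat - 1)) := by
    apply List.filter_congr
    intro k _
    simp only [Function.comp_apply, e1 k, e2 k]
  rw [hpq]
  apply List.map_congr_left
  intro k _
  simp only [Function.comp_apply, e2 k]

-- loop-with-accumulator vs recursion: same fuel, same inputs, offset by the accumulator
lemma loop_eq_fuel : ∀ (f : Nat) (n : Int) (h : List Int) (d : Int),
    (n ≤ 1 ∨ n ≤ (h.length : Int)) →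
    numberOfDaysLoop f d n h = d - 1 + numberOfDaysFuel f n h := by
  intro f
  induction f with
  | zero =>
    intro n h d _
    simp only [numberOfDaysLoop, numberOfDaysFuel]
    omega
  | succ f ih =>
    intro n h d hpre
    by_cases h1 : 1 < n
    · have hlen : n ≤ (h.length : Int) := by
        rcases hpre with hp | hp
        · omega
        · exact hp
      have hne : ¬ n = 1 := by omega
      simp only [numberOfDaysLoop, numberOfDaysFuel, if_pos h1, if_neg hne]
      rw [cut_eq n h h1 hlen]
      set c := ((h.zip (PySem.List.slice h (some 1) (some n))).filter
          (fun p => p.1 > p.2)).map Prod.snd with hc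
      by_cases hcnil : c = []
      · simp only [if_pos hcnil]; omega
      · simp only [if_neg hcnil]
        rw [ih ((h.filter (fun x => !(c.contains x))).length : Int)
              (h.filter (fun x => !(c.contains x))) (d + 1) (Or.inr le_rfl)]
        ring
    · rcases eq_or_ne n 1 with he | he
      · subst he
        simp only [numberOfDaysLoop, numberOfDaysFuel]
        norm_num
      · have hr : PySem.List.pyRange 0 (n - 1) 1 = [] :=
          PySem.List.pyRange_one_eq_nil (by omega)
        simp only [numberOfDaysLoop, numberOfDaysFuel, hr, if_neg h1, if_neg he,
          List.foldl_nil, if_true]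
        norm_num

-- ===== VERDICT (by name: the statement is the Claim_ definition above) =====
theorem numberOfDays_spec : Claim_equal_numberOfDays := by
  intro n h _ hpre
  unfold Spec_numberOfDays numberOfDays numberOfDays_alt
  rw [loop_eq_fuel (h.length + 1) n h 1 hpre]
  ring
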